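-- pv_equiv track=rewrite | github.com/elianaive/one-within-the-novelist | owtn/optimizer/adapters.py | _format_stage_1_population_user_msg
-- ===== SOURCE A (Python) =====
-- def _format_stage_1_population_user_msg(
--     entries: list[tuple[str, str, dict]],
-- ) -> str:
--     blocks = []
--     for i, (program_id, premise, brief) in enumerate(entries):
--         lines = [
--             f"## Lineage {i + 1} — program {program_id[:8]}",
--             f"Premise: {premise}",
--             "",
--             "Established weaknesses:",
--             *(f"- {x}" for x in brief.get("established_weaknesses", [])),
--             "",
--             "Contested strengths:",
--             *(f"- {x}" for x in brief.get("contested_strengths", [])),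
--             "",
--             "Attractor signature:",
--             *(f"- {x}" for x in brief.get("attractor_signature", [])),
--             "",
--             "Divergence directions:",
--             *(f"- {x}" for x in brief.get("divergence_directions", [])),
--         ]
--         blocks.append("\n".join(lines))
--     return "\n\n---\n\n".join(blocks)
-- ===== SOURCE B (Python) =====
-- _SECTIONS = (
--     ("Established weaknesses:", "established_weaknesses"),
--     ("Contested strengths:", "contested_strengths"),
--     ("Attractor signature:", "attractor_signature"),
--     ("Divergence directions:", "divergence_directions"),
-- )
--
--
-- def _format_stage_1_population_user_msg(
--     entries: list[tuple[str, str, dict]],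
-- ) -> str:
--     # Recursively emit EVERY line of the whole message into one flat list,
--     # with explicit "", "---", "" separator lines between lineages, and join ONCE.
--     def emit(rest, i):
--         if not rest:
--             return []
--         pid, premise, brief = rest[0]
--         lines = [f"## Lineage {i} — program {pid[:8]}", f"Premise: {premise}"]
--         for label, key in _SECTIONS:
--             lines.append("")
--             lines.append(label)
--             for x in brief.get(key, []):
--                 lines.append(f"- {x}")
--         tail = emit(rest[1:], i + 1)
--         if tail:
--             return lines + ["", "---", ""] + tail
--         return lines
--
--     return "\n".join(emit(entries, 1))
-- ===== Notes on version B (the rewrite author's own statement) =====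
-- stated objective: alternative
-- what changed: B recursively emits every line of the whole message into ONE flat line list, inserting explicit '', '---', '' separator lines between lineages, and joins once with '\n'; A builds a per-entry 20-item literal list, joins each block with '\n', and joins the blocks with '\n\n---\n\n'.
import Mathlib
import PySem

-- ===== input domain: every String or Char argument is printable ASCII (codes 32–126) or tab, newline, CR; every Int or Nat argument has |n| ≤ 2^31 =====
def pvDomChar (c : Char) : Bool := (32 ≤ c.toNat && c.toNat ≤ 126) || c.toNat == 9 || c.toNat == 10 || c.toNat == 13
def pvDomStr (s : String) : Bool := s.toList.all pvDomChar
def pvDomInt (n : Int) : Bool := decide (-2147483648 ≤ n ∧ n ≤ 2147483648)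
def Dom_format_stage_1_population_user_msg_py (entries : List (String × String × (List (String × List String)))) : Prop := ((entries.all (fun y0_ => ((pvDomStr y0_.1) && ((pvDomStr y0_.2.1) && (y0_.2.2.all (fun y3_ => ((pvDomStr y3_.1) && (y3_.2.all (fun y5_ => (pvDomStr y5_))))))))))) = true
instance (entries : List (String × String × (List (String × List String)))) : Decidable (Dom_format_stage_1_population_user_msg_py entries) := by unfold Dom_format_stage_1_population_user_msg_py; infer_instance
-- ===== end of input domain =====

-- B recursively emits every line of the whole message into ONE flat line list, with
-- explicit "", "---", "" separator lines between lineages, and joins once with "\n";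
-- A joins each lineage block separately and then joins the blocks with "\n\n---\n\n".
-- Same output; objective: alternative.

-- shared primitive: Python dict.get(key, []) on the association list (first match)
def pvDictGetList (brief : List (String × List String)) (key : String) : List String :=
  (((brief.find? (fun kv => kv.1 == key)).map (·.2)).getD [])

-- ===== PORT A =====
def pvABlock (i : Int) (e : String × String × (List (String × List String))) : String :=
  PySem.Str.join "\n" (
    ("## Lineage " ++ PySem.Int.toStr (i + 1) ++ " — program " ++ PySem.Str.slice e.1 none (some 8)) ::
    ("Premise: " ++ e.2.1) ::
    "" ::
    "Established weaknesses:" ::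
    ((pvDictGetList e.2.2 "established_weaknesses").map (fun x => "- " ++ x) ++
    "" ::
    "Contested strengths:" ::
    ((pvDictGetList e.2.2 "contested_strengths").map (fun x => "- " ++ x) ++
    "" ::
    "Attractor signature:" ::
    ((pvDictGetList e.2.2 "attractor_signature").map (fun x => "- " ++ x) ++
    "" ::
    "Divergence directions:" ::
    ((pvDictGetList e.2.2 "divergence_directions").map (fun x => "- " ++ x))))))

def format_stage_1_population_user_msg_py (entries : List (String × String × (List (String × List String)))) : String :=
  PySem.Str.join "\n\n---\n\n"
    ((PySem.List.enumerate entries 0).foldl (fun blocks p => blocks ++ [pvABlock p.1 p.2]) [])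

-- ===== PORT B =====
def pvSections : List (String × String) :=
  [("Established weaknesses:", "established_weaknesses"),
   ("Contested strengths:", "contested_strengths"),
   ("Attractor signature:", "attractor_signature"),
   ("Divergence directions:", "divergence_directions")]

-- Source B's per-entry `lines` accumulator (the `for label, key in _SECTIONS` loop)
def pvBlockLines (i : Int) (pid premise : String) (brief : List (String × List String)) : List String :=
  pvSections.foldl
    (fun lines lk => lines ++ "" :: lk.1 :: (pvDictGetList brief lk.2).map (fun x => "- " ++ x))
    ["## Lineage " ++ PySem.Int.toStr i ++ " — program " ++ PySem.Str.slice pid none (some 8),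
     "Premise: " ++ premise]

-- Source B's recursive `emit`
def pvEmit : List (String × String × (List (String × List String))) → Int → List String
  | [], _ => []
  | e :: rest, i =>
      let lines := pvBlockLines i e.1 e.2.1 e.2.2
      let tail := pvEmit rest (i + 1)
      if tail = [] then lines else lines ++ "" :: "---" :: "" :: tail

def format_stage_1_population_user_msg_py_alt (entries : List (String × String × (List (String × List String)))) : String :=
  PySem.Str.join "\n" (pvEmit entries 1)

-- ===== PRECONDITION & SPEC =====
def Spec_format_stage_1_population_user_msg_py (entries : List (String × String × (List (String × List String)))) (out : String) : Prop := out = format_stage_1_population_user_msg_py_alt entries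
instance (entries : List (String × String × (List (String × List String)))) (out : String) : Decidable (Spec_format_stage_1_population_user_msg_py entries out) := by unfold Spec_format_stage_1_population_user_msg_py; infer_instance

-- ===== CLAIM (what is proved, stated in full; the proofs are below) =====
def Claim_equal_format_stage_1_population_user_msg_py : Prop := ∀ (entries : List (String × String × (List (String × List String)))), Dom_format_stage_1_population_user_msg_py entries → Spec_format_stage_1_population_user_msg_py entries (format_stage_1_population_user_msg_py entries)

-- ===== LEMMAS AND PROOFS =====

-- a join over a cons of two or more parts peels off its head (String level)
theorem str_join_cons_cons (sep p q : String) (rest : List String) :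
    PySem.Str.join sep (p :: q :: rest) = p ++ sep ++ PySem.Str.join sep (q :: rest) := by
  have h := congrArg String.ofList
    (PySem.Chars.join_cons_cons sep.toList p.toList q.toList (rest.map String.toList))
  simpa [PySem.Str.join, String.append_assoc] using h

theorem str_join_singleton (sep x : String) : PySem.Str.join sep [x] = x := by
  simp [PySem.Str.join, PySem.Chars.join_singleton]

-- a join distributes over an append of two nonempty lists of parts
theorem str_join_append (sep : String) (a b : List String) (ha : a ≠ []) (hb : b ≠ []) :
    PySem.Str.join sep (a ++ b) = PySem.Str.join sep a ++ sep ++ PySem.Str.join sep b := by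
  induction a with
  | nil => exact absurd rfl ha
  | cons x a ih =>
    cases a with
    | nil =>
      cases b with
      | nil => exact absurd rfl hb
      | cons y b =>
        rw [List.singleton_append, str_join_cons_cons, str_join_singleton]
    | cons y a' =>
      have h := ih (by simp)
      simp only [List.cons_append] at h ⊢
      rw [str_join_cons_cons, h, str_join_cons_cons]
      simp [String.append_assoc]

-- the concrete shape of Source B's per-entry line list
theorem pvBlockLines_eq (i : Int) (pid premise : String) (brief : List (String × List String)) :
    pvBlockLines i pid premise brief =
      ("## Lineage " ++ PySem.Int.toStr i ++ " — program " ++ PySem.Str.slice pid none (some 8)) ::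
      ("Premise: " ++ premise) ::
      "" :: "Established weaknesses:" ::
      ((pvDictGetList brief "established_weaknesses").map (fun x => "- " ++ x) ++
      "" :: "Contested strengths:" ::
      ((pvDictGetList brief "contested_strengths").map (fun x => "- " ++ x) ++
      "" :: "Attractor signature:" ::
      ((pvDictGetList brief "attractor_signature").map (fun x => "- " ++ x) ++
      "" :: "Divergence directions:" ::
      ((pvDictGetList brief "divergence_directions").map (fun x => "- " ++ x))))) := by
  simp [pvBlockLines, pvSections, List.foldl]

theorem pvBlockLines_ne_nil (i : Int) (pid premise : String) (brief : List (String × List String)) :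
    pvBlockLines i pid premise brief ≠ [] := by
  rw [pvBlockLines_eq]; simp

theorem pvEmit_ne_nil (e : String × String × (List (String × List String)))
    (rest : List (String × String × (List (String × List String)))) (i : Int) :
    pvEmit (e :: rest) i ≠ [] := by
  simp only [pvEmit]
  split
  · exact pvBlockLines_ne_nil _ _ _ _
  · simp [pvBlockLines_ne_nil]

-- each of A's blocks is the "\n"-join of Source B's line list for that entry
theorem pvABlock_eq (i : Int) (e : String × String × (List (String × List String))) :
    pvABlock i e = PySem.Str.join "\n" (pvBlockLines (i + 1) e.1 e.2.1 e.2.2) := by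
  rw [pvBlockLines_eq]; rfl

-- main induction: A's two-level join equals the single join of Source B's flat list
theorem pvMain (entries : List (String × String × (List (String × List String)))) (i : Int) :
    PySem.Str.join "\n\n---\n\n" ((PySem.List.enumerate entries i).map (fun p => pvABlock p.1 p.2)) =
      PySem.Str.join "\n" (pvEmit entries (i + 1)) := by
  induction entries generalizing i with
  | nil => rfl
  | cons e rest ih =>
    simp only [PySem.List.enumerate, List.map, pvEmit]
    cases rest with
    | nil =>
      simp [pvEmit, pvABlock_eq, str_join_singleton]
    | cons e2 rest2 =>
      rw [if_neg (pvEmit_ne_nil e2 rest2 (i + 1 + 1))]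
      have hih := ih (i + 1)
      simp only [PySem.List.enumerate, List.map] at hih
      simp only [PySem.List.enumerate, List.map]
      rw [str_join_cons_cons, hih, pvABlock_eq]
      rw [show ("" :: "---" :: "" :: pvEmit (e2 :: rest2) (i + 1 + 1)) =
            ["", "---", ""] ++ pvEmit (e2 :: rest2) (i + 1 + 1) from rfl]
      rw [← List.append_assoc]
      rw [str_join_append "\n" _ (pvEmit (e2 :: rest2) (i + 1 + 1))
            (by simp [pvBlockLines_ne_nil]) (pvEmit_ne_nil _ _ _)]
      rw [str_join_append "\n" _ ["", "---", ""] (pvBlockLines_ne_nil _ _ _ _) (by simp)]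
      rw [str_join_cons_cons, str_join_cons_cons, str_join_singleton]
      simp [String.append_assoc]

-- ===== VERDICT (by name: the statement is the Claim_ definition above) =====
theorem format_stage_1_population_user_msg_py_spec : Claim_equal_format_stage_1_population_user_msg_py := by
  intro entries _
  unfold Spec_format_stage_1_population_user_msg_py
  unfold format_stage_1_population_user_msg_py format_stage_1_population_user_msg_py_alt
  rw [PySem.List.foldl_append_singleton_eq_map]
  simpa using pvMain entries 0
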